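-- pv_equiv track=rewrite | github.com/flashlin/Samples | torch-gpt-demo/translate_file_datasets.py | pad_zip
-- ===== SOURCE A (Python) =====
-- from typing import TypeVar
--
-- T = TypeVar('T')
--
-- def pad_list(value_list: list[T], max_len: int, pad: T) -> list[T]:
--     len_values = len(value_list)
--     if len_values < max_len:
--         return value_list + [pad] * (max_len - len_values)
--     return value_list
--
-- def pad_zip(src_words: list[T], tgt_words: list[T],
--             max_len: int, pad: T) -> list[[T, T, T]]:
--     """
--     :param src_words: ['a', 'b', 'c']
--     :param tgt_words: ['a', 'b', 'c']
--     :param max_len: 2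
--     :param pad: '<PAD>'
--     :return: [['a','b'],['b','c']]
--     """
--     len_range = max(len(src_words), len(tgt_words))
--     if len_range < max_len:
--         len_range = 1
--     if len_range > max_len:
--         len_range = len_range - max_len + 1
--     result = []
--     for i in range(len_range):
--         sub_src_words = src_words[i:i + max_len]
--         sub_src = pad_list(sub_src_words, max_len, pad)
--         sub_tgt1 = pad_list(tgt_words[i:i + max_len], max_len, pad)
--         sub_tgt2 = pad_list(tgt_words[i + 1:i + 1 + max_len], max_len, pad)
--         result.append([sub_src, sub_tgt1, sub_tgt2])
--     return result
-- ===== SOURCE B (Python) =====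
-- def pad_zip(src_words, tgt_words, max_len, pad):
--     n = max(len(src_words), len(tgt_words))
--     if n < max_len:
--         len_range = 1
--     elif n > max_len:
--         len_range = n - max_len + 1
--     else:
--         len_range = n
--
--     def window(xs, start):
--         return [xs[start + j] if start + j < len(xs) else pad
--                 for j in range(max_len)]
--
--     return [[window(src_words, i), window(tgt_words, i), window(tgt_words, i + 1)]
--             for i in range(len_range)]
-- ===== Notes on version B (the rewrite author's own statement) =====
-- stated objective: alternative
-- what changed: B drops slicing and pad_list entirely: each output row is built element-by-element with a total indexed get-or-pad (xs[i+j] if in range else pad) over range(max_len), instead of A's slice-then-conditionally-pad per window; Pre_ restricts to nonnegative max_len (the natural domain of a window length), excluding negative max_len where A's negative-stop slicing can yield nonempty windows that the per-element construction intentionally does not reproduce.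
import Mathlib
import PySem

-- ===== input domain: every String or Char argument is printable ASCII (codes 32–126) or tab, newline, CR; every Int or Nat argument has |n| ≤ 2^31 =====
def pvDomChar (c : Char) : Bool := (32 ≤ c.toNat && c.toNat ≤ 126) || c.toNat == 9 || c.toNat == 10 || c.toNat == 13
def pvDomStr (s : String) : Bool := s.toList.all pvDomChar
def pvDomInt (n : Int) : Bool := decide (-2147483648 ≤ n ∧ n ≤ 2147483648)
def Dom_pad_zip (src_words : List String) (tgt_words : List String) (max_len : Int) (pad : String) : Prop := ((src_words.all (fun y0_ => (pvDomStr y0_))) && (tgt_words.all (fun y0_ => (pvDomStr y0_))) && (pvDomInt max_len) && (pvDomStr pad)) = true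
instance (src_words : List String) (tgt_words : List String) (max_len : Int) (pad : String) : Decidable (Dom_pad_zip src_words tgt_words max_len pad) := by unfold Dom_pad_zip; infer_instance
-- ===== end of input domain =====

-- B builds each window element-by-element with a total get-or-pad lookup instead of slicing and padding; alternative decomposition, not claimed faster.

-- ===== PORT A =====
def pad_list (value_list : List String) (max_len : Int) (pad : String) : List String :=
  let len_values : Int := value_list.length
  if len_values < max_len then
    value_list ++ List.replicate (max_len - len_values).toNat pad
  else value_list

def pad_zip (src_words : List String) (tgt_words : List String) (max_len : Int) (pad : String) : List (List (List String)) :=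
  let len_range0 : Int := max (src_words.length : Int) (tgt_words.length : Int)
  let len_range1 : Int := if len_range0 < max_len then 1 else len_range0
  let len_range : Int := if len_range1 > max_len then len_range1 - max_len + 1 else len_range1
  (PySem.List.pyRange 0 len_range 1).foldl (fun result i =>
    let sub_src_words := PySem.List.slice src_words (some i) (some (i + max_len))
    let sub_src := pad_list sub_src_words max_len pad
    let sub_tgt1 := pad_list (PySem.List.slice tgt_words (some i) (some (i + max_len))) max_len pad
    let sub_tgt2 := pad_list (PySem.List.slice tgt_words (some (i + 1)) (some (i + 1 + max_len))) max_len pad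
    result ++ [[sub_src, sub_tgt1, sub_tgt2]]) []

-- ===== PORT B =====
-- window xs start = [xs[start+j] if start+j < len(xs) else pad for j in range(max_len)]
def pz_window (xs : List String) (max_len : Int) (pad : String) (start : Int) : List String :=
  (PySem.List.pyRange 0 max_len 1).map (fun j =>
    if start + j < (xs.length : Int) then (PySem.List.pyGet? xs (start + j)).getD pad else pad)

def pad_zip_alt (src_words : List String) (tgt_words : List String) (max_len : Int) (pad : String) : List (List (List String)) :=
  let n : Int := max (src_words.length : Int) (tgt_words.length : Int)
  let len_range : Int :=
    if n < max_len then 1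
    else if n > max_len then n - max_len + 1
    else n
  (PySem.List.pyRange 0 len_range 1).map (fun i =>
    [pz_window src_words max_len pad i,
     pz_window tgt_words max_len pad i,
     pz_window tgt_words max_len pad (i + 1)])

-- ===== PRECONDITION & SPEC =====
-- Pre_ restricts to the natural domain of a window length: it excludes negative max_len,
-- where A's per-window slices use Python's negative-stop slicing (which can yield nonempty
-- windows) — an artefact B's per-element get-or-pad construction does not reproduce.
def Pre_pad_zip (src_words : List String) (tgt_words : List String) (max_len : Int) (pad : String) : Prop := 0 ≤ max_len
instance (src_words : List String) (tgt_words : List String) (max_len : Int) (pad : String) : Decidable (Pre_pad_zip src_words tgt_words max_len pad) := by unfold Pre_pad_zip; infer_instance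
def pvWitness_pad_zip : List String × List String × Int × String := (["a", "b", "c"], ["x", "y"], 2, "<PAD>")
def Spec_pad_zip (src_words : List String) (tgt_words : List String) (max_len : Int) (pad : String) (out : List (List (List String))) : Prop := out = pad_zip_alt src_words tgt_words max_len pad
instance (src_words : List String) (tgt_words : List String) (max_len : Int) (pad : String) (out : List (List (List String))) : Decidable (Spec_pad_zip src_words tgt_words max_len pad out) := by unfold Spec_pad_zip; infer_instance

-- ===== CLAIM (what is proved, stated in full; the proofs are below) =====
def Claim_equal_pad_zip : Prop := ∀ (src_words : List String) (tgt_words : List String) (max_len : Int) (pad : String), Dom_pad_zip src_words tgt_words max_len pad → Pre_pad_zip src_words tgt_words max_len pad → Spec_pad_zip src_words tgt_words max_len pad (pad_zip src_words tgt_words max_len pad)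

-- ===== LEMMAS AND PROOFS =====

-- B's element-wise window equals A's padded slice (for a nonneg start and positive width).
theorem window_eq_pad_list (xs : List String) (pad : String) (i m : Int)
    (h0 : 0 ≤ i) (hm : 0 ≤ m) :
    pz_window xs m pad i = pad_list (PySem.List.slice xs (some i) (some (i + m))) m pad := by
  unfold pz_window
  rw [PySem.List.slice_toNat _ h0 (by omega), PySem.List.pyRange_one]
  have hb : (i + m).toNat - i.toNat = m.toNat := by omega
  rw [hb]
  set L := (xs.drop i.toNat).take m.toNat with hL
  have hLlen : L.length = min m.toNat (xs.length - i.toNat) := by simp [hL]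
  apply List.ext_getElem
  · simp only [List.length_map, List.length_range, pad_list]
    split_ifs with h
    · simp only [List.length_append, List.length_replicate]
      omega
    · simp only [hLlen] at h ⊢
      omega
  · intro k h1 h2
    simp only [List.length_map, List.length_range] at h1
    have hk : k < m.toNat := by omega
    simp only [List.getElem_map, List.getElem_range]
    have hik : i + (0 + (k : Int)) = ((i.toNat + k : Nat) : Int) := by omega
    rw [hik]
    simp only [pad_list]
    by_cases hkin : i.toNat + k < xs.length
    · rw [if_pos (by exact_mod_cast (by omega : ((i.toNat + k : Nat) : Int) < (xs.length : Int)))]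
      rw [PySem.List.pyGet?_natCast, List.getElem?_eq_getElem hkin, Option.getD_some]
      have hkL : k < L.length := by omega
      split_ifs with h
      · rw [List.getElem_append_left hkL]
        simp [hL]
      · simp [hL]
    · rw [if_neg (by exact_mod_cast (by omega : ¬ ((i.toNat + k : Nat) : Int) < (xs.length : Int)))]
      have hkL : ¬ k < L.length := by omega
      split_ifs with h
      · rw [List.getElem_append_right (by omega)]
        simp
      · exfalso
        omega

theorem pad_zip_eq_alt (src_words : List String) (tgt_words : List String) (max_len : Int) (pad : String)
    (hm : 0 ≤ max_len) :
    pad_zip src_words tgt_words max_len pad = pad_zip_alt src_words tgt_words max_len pad := by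
  unfold pad_zip pad_zip_alt
  simp only [PySem.List.foldl_append_singleton_eq_map, List.nil_append]
  have hrange :
      (if max (src_words.length : Int) (tgt_words.length : Int) < max_len then (1 : Int)
        else if max (src_words.length : Int) (tgt_words.length : Int) > max_len
          then max (src_words.length : Int) (tgt_words.length : Int) - max_len + 1
        else max (src_words.length : Int) (tgt_words.length : Int)) =
      (if (if max (src_words.length : Int) (tgt_words.length : Int) < max_len then (1 : Int)
            else max (src_words.length : Int) (tgt_words.length : Int)) > max_len
        then (if max (src_words.length : Int) (tgt_words.length : Int) < max_len then (1 : Int)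
              else max (src_words.length : Int) (tgt_words.length : Int)) - max_len + 1
        else (if max (src_words.length : Int) (tgt_words.length : Int) < max_len then (1 : Int)
              else max (src_words.length : Int) (tgt_words.length : Int))) := by
    split_ifs <;> omega
  rw [← hrange]
  apply List.map_congr_left
  intro i hi
  rw [PySem.List.mem_pyRange_one] at hi
  obtain ⟨h0, _⟩ := hi
  rw [window_eq_pad_list src_words pad i max_len h0 hm,
      window_eq_pad_list tgt_words pad i max_len h0 hm,
      window_eq_pad_list tgt_words pad (i + 1) max_len (by omega) hm]

-- ===== VERDICT (by name: the statement is the Claim_ definition above) =====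
theorem pad_zip_spec : Claim_equal_pad_zip := by
  intro src tgt m pad _ hpre
  exact pad_zip_eq_alt src tgt m pad hpre
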